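-- pv_equiv track=rewrite | github.com/NREL/EP-Launch | eplaunch/utilities/version.py | numeric_version_from_string
-- ===== SOURCE A (Python) =====
-- def numeric_version_from_string(string_version, override_patch=True):
--     # if the version string has sha1 hash at the end remove it
--     words = string_version.split("-")
--     # the rest of the version number should just be separated by periods
--     parts = words[0].split(".")
--     numeric_version = 0
--     parts = parts[:3]
--     # overwrite the patch number with a zero, or append a zero patch number
--     if override_patch:
--         if len(parts) == 3:
--             parts[2] = 0
--     if len(parts) == 2:
--         parts.append("0")
--     for part in parts:
--         numeric_version = numeric_version * 100 + int(part)
--     return numeric_version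
-- ===== SOURCE B (Python) =====
-- def numeric_version_from_string(string_version, override_patch=True):
--     # positional formula instead of the Horner accumulation loop
--     parts = string_version.split("-")[0].split(".")[:3]
--     if len(parts) == 1:
--         return int(parts[0])
--     major = int(parts[0]) * 10000 + int(parts[1]) * 100
--     if override_patch or len(parts) == 2:
--         return major
--     return major + int(parts[2])
-- ===== Notes on version B (the rewrite author's own statement) =====
-- stated objective: simpler
-- what changed: Replaces the list-mutating Horner accumulation loop (overwrite/append of a zero patch, then fold) with a direct branch on the number of parts and an explicit positional formula major*10000 + minor*100 + patch.
import Mathlib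
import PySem

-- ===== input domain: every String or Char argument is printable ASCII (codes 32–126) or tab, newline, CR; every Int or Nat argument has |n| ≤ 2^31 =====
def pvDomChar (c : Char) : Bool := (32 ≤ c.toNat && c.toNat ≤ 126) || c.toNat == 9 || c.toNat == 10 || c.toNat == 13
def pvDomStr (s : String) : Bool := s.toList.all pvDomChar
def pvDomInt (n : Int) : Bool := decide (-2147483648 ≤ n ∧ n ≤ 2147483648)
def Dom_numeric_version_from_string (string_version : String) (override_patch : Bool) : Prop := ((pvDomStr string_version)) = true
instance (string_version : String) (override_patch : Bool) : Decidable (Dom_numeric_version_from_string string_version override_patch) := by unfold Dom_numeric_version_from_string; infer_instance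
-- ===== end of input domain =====

-- B replaces A's list-mutating Horner loop by a branch on the number of parts with an
-- explicit positional formula (objective: simpler).

-- ===== PORT A =====
-- Python's `parts[2] = 0` stores the int 0 in a list of strings; since int(0) = 0 = int("0"),
-- the port stores the string "0" there (the only subsequent use is int(part)).
def numeric_version_from_string (string_version : String) (override_patch : Bool) : Int :=
  let words := ((PySem.Str.split? string_version "-").getD [])
  let parts := ((PySem.Str.split? (words.headD "") ".").getD [])   -- words[0]: split is never empty
  let parts := parts.take 3                              -- parts[:3]
  let parts := if override_patch then
                 (if parts.length = 3 then parts.set 2 "0" else parts)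
               else parts
  let parts := if parts.length = 2 then parts ++ ["0"] else parts
  -- int(part) raises ValueError when ofStr? = none: those inputs are outside Pre_
  parts.foldl (fun acc part => acc * 100 + (PySem.Int.ofStr? part).getD 0) 0

-- ===== PORT B =====
def numeric_version_from_string_alt (string_version : String) (override_patch : Bool) : Int :=
  let parts := ((PySem.Str.split? (((PySem.Str.split? string_version "-").getD []).headD "") ".").getD []).take 3
  -- parts[i] is written parts.getD i "": every access below is in range in Source B
  if parts.length = 1 then (PySem.Int.ofStr? (parts.getD 0 "")).getD 0
  else
    let major := (PySem.Int.ofStr? (parts.getD 0 "")).getD 0 * 10000 +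
                 (PySem.Int.ofStr? (parts.getD 1 "")).getD 0 * 100
    if override_patch || parts.length = 2 then major
    else major + (PySem.Int.ofStr? (parts.getD 2 "")).getD 0

-- ===== PRECONDITION & SPEC =====
-- Pre_ excludes exactly the inputs on which Python A raises ValueError: some part that
-- A actually passes to int() does not parse as a Python int.
def Pre_numeric_version_from_string (string_version : String) (override_patch : Bool) : Prop :=
  let parts := ((PySem.Str.split? (((PySem.Str.split? string_version "-").getD []).headD "") ".").getD []).take 3
  (∀ p ∈ parts.take 2, (PySem.Int.ofStr? p).isSome = true) ∧
  (override_patch = false → ∀ p ∈ parts.drop 2, (PySem.Int.ofStr? p).isSome = true)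
instance (string_version : String) (override_patch : Bool) : Decidable (Pre_numeric_version_from_string string_version override_patch) := by unfold Pre_numeric_version_from_string; infer_instance

def pvWitness_numeric_version_from_string : String × Bool := ("9.0.1-abcdef", false)

def Spec_numeric_version_from_string (string_version : String) (override_patch : Bool) (out : Int) : Prop := out = numeric_version_from_string_alt string_version override_patch
instance (string_version : String) (override_patch : Bool) (out : Int) : Decidable (Spec_numeric_version_from_string string_version override_patch out) := by unfold Spec_numeric_version_from_string; infer_instance

-- ===== CLAIM (what is proved, stated in full; the proofs are below) =====
def Claim_equal_numeric_version_from_string : Prop := ∀ (string_version : String) (override_patch : Bool), Dom_numeric_version_from_string string_version override_patch → Pre_numeric_version_from_string string_version override_patch → Spec_numeric_version_from_string string_version override_patch (numeric_version_from_string string_version override_patch)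

-- ===== LEMMAS AND PROOFS =====
theorem pv_zero_part : (PySem.Int.ofStr? "0").getD 0 = 0 := by decide

-- The packing computed by A's (mutate-then-fold) pipeline equals B's positional formula,
-- for any part list of length ≤ 3.
theorem pv_pack_eq (ps : List String) (op : Bool) (h3 : ps.length ≤ 3) :
    (let ps1 := if op then (if ps.length = 3 then ps.set 2 "0" else ps) else ps
     let ps2 := if ps1.length = 2 then ps1 ++ ["0"] else ps1
     ps2.foldl (fun acc part => acc * 100 + (PySem.Int.ofStr? part).getD 0) 0)
    = (if ps.length = 1 then (PySem.Int.ofStr? (ps.getD 0 "")).getD 0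
       else
         let major := (PySem.Int.ofStr? (ps.getD 0 "")).getD 0 * 10000 +
                      (PySem.Int.ofStr? (ps.getD 1 "")).getD 0 * 100
         if op || ps.length = 2 then major
         else major + (PySem.Int.ofStr? (ps.getD 2 "")).getD 0) := by
  have hnone : (PySem.Int.ofStr? "").getD 0 = 0 := by decide
  match ps with
  | [] => cases op <;> simp [hnone]
  | [p0] => cases op <;> simp [List.foldl]
  | [p0, p1] => cases op <;> simp [List.foldl, pv_zero_part] <;> ring
  | [p0, p1, p2] => cases op <;> simp [List.foldl, List.set, pv_zero_part] <;> ring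
  | p0 :: p1 :: p2 :: p3 :: t => simp at h3; omega

-- ===== VERDICT (by name: the statement is the Claim_ definition above) =====
theorem numeric_version_from_string_spec : Claim_equal_numeric_version_from_string := by
  intro s op _ _
  unfold Spec_numeric_version_from_string
  simp only [numeric_version_from_string, numeric_version_from_string_alt]
  exact pv_pack_eq _ op (List.length_take_le 3 _)
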